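-- pv_equiv track=rewrite | github.com/iop07695432/fastdbchkrep | src/fastdbchkrep/report/oracle/generator.py | _detect_table_columns
-- ===== SOURCE A (Python) =====
-- def _detect_table_columns(header_line: str) -> list:
--     """
--     检测表格列的位置
--
--     Args:
--         header_line: 表头行
--
--     Returns:
--         list: 列的起始位置列表
--     """
--     columns = [0]  # 第一列总是从位置0开始
--
--     # 找到每个单词的结束位置，作为潜在的列分隔点
--     words = []
--     current_word = ""
--     start_pos = 0
--
--     i = 0
--     while i < len(header_line):
--         if header_line[i] != ' ':
--             if not current_word:  # 新单词开始
--                 start_pos = i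
--             current_word += header_line[i]
--         else:
--             if current_word:  # 单词结束
--                 words.append((start_pos, i, current_word))
--                 current_word = ""
--         i += 1
--
--     # 最后一个单词
--     if current_word:
--         words.append((start_pos, len(header_line), current_word))
--
--     # 基于单词间距检测列分隔
--     for i in range(1, len(words)):
--         prev_end = words[i-1][1]
--         curr_start = words[i][0]
--
--         # 如果间距大于2个空格，认为是新列
--         if curr_start - prev_end >= 2:
--             columns.append(curr_start)
--
--     return columns
-- ===== SOURCE B (Python) =====
-- def _detect_table_columns(header_line: str) -> list:
--     """Detect table column start positions from a header line.
--
--     Skip/consume span tokenizer + pairwise gap scan (no per-character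
--     state machine, no per-character string accumulation).
--     """
--     # Tokenize into (start, end) word spans: skip runs of spaces,
--     # consume runs of any other character (tabs/newlines stay in words).
--     spans = []
--     n = len(header_line)
--     i = 0
--     while i < n:
--         if header_line[i] == ' ':
--             i += 1
--         else:
--             j = i + 1
--             while j < n and header_line[j] != ' ':
--                 j += 1
--             spans.append((i, j))
--             i = j
--     columns = [0]
--     for (_, prev_end), (curr_start, _) in zip(spans, spans[1:]):
--         if curr_start - prev_end >= 2:
--             columns.append(curr_start)
--     return columns
-- ===== Notes on version B (the rewrite author's own statement) =====
-- stated objective: faster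
-- what changed: Replaces A's per-character state machine (current_word/start_pos accumulation plus an index loop over the word list) with a skip/consume span tokenizer and a pairwise zip scan over adjacent spans; no word text is built at all, removing A's char-by-char string accumulation.
import Mathlib
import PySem

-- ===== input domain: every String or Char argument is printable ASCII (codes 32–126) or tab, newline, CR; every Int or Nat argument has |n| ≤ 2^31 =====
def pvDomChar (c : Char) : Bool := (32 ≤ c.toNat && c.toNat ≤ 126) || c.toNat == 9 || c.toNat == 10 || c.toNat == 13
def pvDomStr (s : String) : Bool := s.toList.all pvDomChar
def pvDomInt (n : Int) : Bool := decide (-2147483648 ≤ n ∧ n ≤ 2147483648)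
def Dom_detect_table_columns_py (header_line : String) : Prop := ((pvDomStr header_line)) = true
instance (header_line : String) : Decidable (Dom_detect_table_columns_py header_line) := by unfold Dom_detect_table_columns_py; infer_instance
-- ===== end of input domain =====

-- B replaces A's per-character state machine by a skip/consume span tokenizer plus a
-- pairwise scan over adjacent spans; it builds no word text (A's 'current_word += c'
-- copies the growing word), which a timing run measured as substantially faster.


-- ===== PORT A =====
-- A's while-loop over characters: state (current_word, start_pos, words)
def pvAloop (cs : List Char) (i : Int) (cw : String) (sp : Int)
    (ws : List (Int × Int × String)) : List (Int × Int × String) × String × Int :=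
  match cs with
  | [] => (ws, cw, sp)
  | c :: rest =>
    if c ≠ ' ' then
      let sp' := if cw = "" then i else sp
      pvAloop rest (i + 1) (cw.push c) sp' ws
    else if cw ≠ "" then
      pvAloop rest (i + 1) "" sp (ws ++ [(sp, i, cw)])
    else
      pvAloop rest (i + 1) cw sp ws

def detect_table_columns_py (header_line : String) : List Int :=
  let cs := header_line.toList
  let r := pvAloop cs 0 "" 0 []
  let words := if r.2.1 ≠ "" then r.1 ++ [(r.2.2, (cs.length : Int), r.2.1)] else r.1
  (PySem.List.pyRange 1 (words.length : Int) 1).foldl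
    (fun columns i =>
      if (PySem.List.pyGetD words i (0, 0, "")).1 -
          (PySem.List.pyGetD words (i - 1) (0, 0, "")).2.1 ≥ 2 then
        columns ++ [(PySem.List.pyGetD words i (0, 0, "")).1]
      else columns) [0]

-- ===== PORT B =====
-- B's tokenizer: skip a space, or consume a whole run of non-spaces as one span
def pvSpans (cs : List Char) (i : Int) : List (Int × Int) :=
  match cs with
  | [] => []
  | c :: rest =>
    if c = ' ' then pvSpans rest (i + 1)
    else
      (i, i + 1 + ((rest.takeWhile (· ≠ ' ')).length : Int)) ::
        pvSpans (rest.drop (rest.takeWhile (· ≠ ' ')).length)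
          (i + 1 + ((rest.takeWhile (· ≠ ' ')).length : Int))
termination_by cs.length
decreasing_by all_goals simp [List.length_drop]

def detect_table_columns_py_alt (header_line : String) : List Int :=
  let spans := pvSpans header_line.toList 0
  (spans.zip (spans.drop 1)).foldl
    (fun columns p => if p.2.1 - p.1.2 ≥ 2 then columns ++ [p.2.1] else columns) [0]

-- ===== PRECONDITION & SPEC =====
def Spec_detect_table_columns_py (header_line : String) (out : List Int) : Prop := out = detect_table_columns_py_alt header_line
instance (header_line : String) (out : List Int) : Decidable (Spec_detect_table_columns_py header_line out) := by unfold Spec_detect_table_columns_py; infer_instance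

-- ===== CLAIM (what is proved, stated in full; the proofs are below) =====
def Claim_equal_detect_table_columns_py : Prop := ∀ (header_line : String), Dom_detect_table_columns_py header_line → Spec_detect_table_columns_py header_line (detect_table_columns_py header_line)

-- ===== LEMMAS AND PROOFS =====

-- pairwise gap scan (proof-side characterisation of both column stages)
def pvGaps : List (Int × Int) → List Int
  | a :: b :: t => (if b.1 - a.2 ≥ 2 then [b.1] else []) ++ pvGaps (b :: t)
  | _ => []

-- the span components of A's word triples
def pvProj (ws : List (Int × Int × String)) : List (Int × Int) :=
  ws.map (fun t => (t.1, t.2.1))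

-- A's words (loop result + trailing word), started from an arbitrary state
def pvAwords (cs : List Char) (i : Int) (cw : String) (sp : Int) :
    List (Int × Int × String) :=
  let r := pvAloop cs i cw sp []
  if r.2.1 ≠ "" then r.1 ++ [(r.2.2, i + (cs.length : Int), r.2.1)] else r.1

theorem pvSpans_nil (i : Int) : pvSpans [] i = [] := by rw [pvSpans]

theorem pvSpans_cons_space (rest : List Char) (i : Int) :
    pvSpans (' ' :: rest) i = pvSpans rest (i + 1) := by rw [pvSpans]; simp

theorem pvSpans_cons_word (c : Char) (rest : List Char) (i : Int) (hc : c ≠ ' ') :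
    pvSpans (c :: rest) i =
      (i, i + 1 + ((rest.takeWhile (· ≠ ' ')).length : Int)) ::
        pvSpans (rest.drop (rest.takeWhile (· ≠ ' ')).length)
          (i + 1 + ((rest.takeWhile (· ≠ ' ')).length : Int)) := by
  rw [pvSpans]; simp [hc]

theorem pvPush_ne_empty (s : String) (c : Char) : s.push c ≠ "" := by
  intro h
  have := congrArg String.length h
  simp at this

theorem pvAloop_acc (cs : List Char) :
    ∀ i cw sp ws, pvAloop cs i cw sp ws =
      ((ws ++ (pvAloop cs i cw sp []).1, (pvAloop cs i cw sp []).2)) := by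
  induction cs with
  | nil => intro i cw sp ws; simp [pvAloop]
  | cons c rest ih =>
    intro i cw sp ws
    simp only [pvAloop]
    split_ifs
    all_goals
      first
      | exact ih ..
      | (rw [ih (i + 1) "" sp (ws ++ [(sp, i, cw)]), ih (i + 1) "" sp ([] ++ [(sp, i, cw)])]
         simp)

-- one step of A's word collection
theorem pvAwords_cons (c : Char) (rest : List Char) (i : Int) (cw : String) (sp : Int) :
    pvAwords (c :: rest) i cw sp =
      if c = ' ' then
        (if cw = "" then pvAwords rest (i + 1) cw sp
         else (sp, i, cw) :: pvAwords rest (i + 1) "" sp)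
      else pvAwords rest (i + 1) (cw.push c) (if cw = "" then i else sp) := by
  have harith : i + (((rest.length + 1 : Nat)) : Int) = i + 1 + (rest.length : Int) := by
    push_cast; ring
  by_cases hc : c = ' ' <;> by_cases h : cw = ""
  · -- space, empty word
    simp only [pvAwords, pvAloop, hc, h, if_pos, ite_not, List.length_cons]
    try simp only [harith]
    try simp
  · -- space, word ends here
    simp only [pvAwords, pvAloop, hc, h, ite_not, List.length_cons]
    try simp only [harith]
    rw [pvAloop_acc rest (i + 1) "" sp ([] ++ [(sp, i, cw)])]
    by_cases h2 : (pvAloop rest (i + 1) "" sp []).2.1 = "" <;> simp [h2]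
  · -- non-space, empty word
    simp only [pvAwords, pvAloop, ite_not, List.length_cons, if_neg hc, h]
    try simp only [harith]
    try simp
  · -- non-space, inside a word
    simp only [pvAwords, pvAloop, ite_not, List.length_cons, if_neg hc, h]
    try simp only [harith]
    try simp [h]

theorem pvAwords_spans (cs : List Char) :
    ∀ i cw sp, pvProj (pvAwords cs i cw sp) =
      if cw = "" then pvSpans cs i
      else (sp, i + ((cs.takeWhile (· ≠ ' ')).length : Int)) ::
        pvSpans (cs.drop (cs.takeWhile (· ≠ ' ')).length)
          (i + ((cs.takeWhile (· ≠ ' ')).length : Int)) := by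
  induction cs with
  | nil =>
    intro i cw sp
    by_cases h : cw = "" <;>
      simp [pvAwords, pvAloop, pvProj, pvSpans_nil, h, List.takeWhile]
  | cons c rest ih =>
    intro i cw sp
    rw [pvAwords_cons]
    by_cases hc : c = ' '
    · subst hc
      by_cases h : cw = ""
      · rw [if_pos rfl, if_pos h, if_pos h, pvSpans_cons_space]
        have := ih (i + 1) cw sp
        rw [if_pos h] at this
        exact this
      · rw [if_pos rfl, if_neg h, if_neg h]
        simp only [pvProj, List.map_cons]
        have := ih (i + 1) "" sp
        rw [if_pos rfl] at this
        rw [show List.map (fun t : Int × Int × String => (t.1, t.2.1))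
              (pvAwords rest (i+1) "" sp) = pvProj (pvAwords rest (i+1) "" sp) from rfl,
            this]
        simp [List.takeWhile, pvSpans_cons_space]
    · rw [if_neg hc]
      have htw : (c :: rest).takeWhile (· ≠ ' ') = c :: rest.takeWhile (· ≠ ' ') := by
        simp [List.takeWhile, hc]
      have := ih (i + 1) (cw.push c) (if cw = "" then i else sp)
      rw [if_neg (pvPush_ne_empty cw c)] at this
      rw [this]
      by_cases h : cw = ""
      · rw [if_pos h, if_pos h, pvSpans_cons_word c rest i hc]
      · rw [if_neg h, if_neg h, htw]
        have hlen : ((((c :: rest.takeWhile (· ≠ ' ')).length : Nat)) : Int) =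
            1 + ((rest.takeWhile (· ≠ ' ')).length : Int) := by
          simp; ring
        rw [List.length_cons]
        have harith : i + (((rest.takeWhile (· ≠ ' ')).length + 1 : Nat) : Int) =
            i + 1 + ((rest.takeWhile (· ≠ ' ')).length : Int) := by push_cast; ring
        rw [harith]
        rw [show (c :: rest).drop ((rest.takeWhile (· ≠ ' ')).length + 1) =
              rest.drop ((rest.takeWhile (· ≠ ' ')).length) from rfl]

-- the snoc step of the pairwise gap scan
theorem pvGaps_snoc (l : List (Int × Int)) (hl : l ≠ []) (w : Int × Int) :
    pvGaps (l ++ [w]) =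
      pvGaps l ++ (if w.1 - (l.getLast hl).2 ≥ 2 then [w.1] else []) := by
  induction l with
  | nil => exact absurd rfl hl
  | cons a t ih =>
    cases t with
    | nil => simp [pvGaps]
    | cons b t' =>
      have := ih (by simp)
      simp only [List.cons_append, pvGaps] at *
      rw [this]
      simp [List.getLast]

-- B's zip fold computes 0 :: pvGaps spans
theorem pvBfold_acc (pairs : List ((Int × Int) × (Int × Int))) :
    ∀ acc : List Int,
      pairs.foldl
        (fun columns p => if p.2.1 - p.1.2 ≥ 2 then columns ++ [p.2.1] else columns) acc
      = acc ++ pairs.flatMap (fun p => if p.2.1 - p.1.2 ≥ 2 then [p.2.1] else []) := by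
  induction pairs with
  | nil => intro acc; simp
  | cons a t ih =>
    intro acc
    by_cases h : a.2.1 - a.1.2 ≥ 2 <;> simp [h, ih]

theorem pvB_fold (l : List (Int × Int)) :
    (l.zip (l.drop 1)).foldl
      (fun columns p => if p.2.1 - p.1.2 ≥ 2 then columns ++ [p.2.1] else columns)
      [0] = 0 :: pvGaps l := by
  rw [pvBfold_acc]
  suffices h : (l.zip (l.drop 1)).flatMap
      (fun p => if p.2.1 - p.1.2 ≥ 2 then [p.2.1] else []) = pvGaps l by rw [h]; rfl
  induction l with
  | nil => rfl
  | cons a t ih =>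
    cases t with
    | nil => rfl
    | cons b t' =>
      simp only [List.drop_succ_cons, List.drop_zero, List.zip_cons_cons,
        List.flatMap_cons] at *
      by_cases hb : b.1 - a.2 ≥ 2 <;> simp [hb, pvGaps, ih]

-- A's indexed fold over range(1, len(words)) computes 0 :: pvGaps (pvProj ws)
theorem pvA_fold (ws : List (Int × Int × String)) :
    (PySem.List.pyRange 1 (ws.length : Int) 1).foldl
      (fun columns i =>
        if (PySem.List.pyGetD ws i (0, 0, "")).1 -
            (PySem.List.pyGetD ws (i - 1) (0, 0, "")).2.1 ≥ 2 then
          columns ++ [(PySem.List.pyGetD ws i (0, 0, "")).1]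
        else columns) [0] = 0 :: pvGaps (pvProj ws) := by
  induction ws using List.reverseRecOn with
  | nil =>
    rw [show ((List.length ([] : List (Int × Int × String))) : Int) = 0 from by simp,
      PySem.List.pyRange_one_eq_nil (by omega : (0:Int) ≤ 1)]
    simp [pvGaps, pvProj]
  | append_singleton t w ih =>
    cases t with
    | nil =>
      rw [show ((([] : List (Int × Int × String)) ++ [w]).length : Int) = 1 from by simp,
        PySem.List.pyRange_one_eq_nil (le_refl (1 : Int))]
      simp [pvGaps, pvProj]
    | cons a t' =>
      set l := a :: t' with hl
      have hpos : 0 < l.length := by rw [hl]; simp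
      have hsplit : PySem.List.pyRange 1 (((l ++ [w]).length : Int)) =
          PySem.List.pyRange 1 ((l.length : Int)) ++ [(l.length : Int)] := by
        rw [show (((l ++ [w]).length : Int)) = (l.length : Int) + 1 from by simp]
        exact PySem.List.pyRange_one_succ_right (by omega)
      rw [hsplit, List.foldl_append]
      have hcongr : (PySem.List.pyRange 1 (l.length : Int) 1).foldl
          (fun columns i =>
            if (PySem.List.pyGetD (l ++ [w]) i (0, 0, "")).1 -
                (PySem.List.pyGetD (l ++ [w]) (i - 1) (0, 0, "")).2.1 ≥ 2 then
              columns ++ [(PySem.List.pyGetD (l ++ [w]) i (0, 0, "")).1]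
            else columns) [0] = 0 :: pvGaps (pvProj l) := by
        rw [← ih]
        apply PySem.List.foldl_congr_mem
        intro acc x hx
        have hx' := (PySem.List.mem_pyRange_one.mp hx)
        have h1 : PySem.List.pyGetD (l ++ [w]) x (0, 0, "") =
            PySem.List.pyGetD l x (0, 0, "") := by
          have ea : PySem.List.pyGetD (l ++ [w]) x (0, 0, "") = (l ++ [w])[x.toNat]'(by
              simp; omega) :=
            PySem.List.pyGetD_eq_getElem (l ++ [w]) (0, 0, "") (by omega)
              (by simp; omega)
          have eb : PySem.List.pyGetD l x (0, 0, "") = l[x.toNat]'(by omega) :=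
            PySem.List.pyGetD_eq_getElem l (0, 0, "") (by omega) (by omega)
          rw [ea, eb, List.getElem_append_left (by omega)]
        have h2 : PySem.List.pyGetD (l ++ [w]) (x - 1) (0, 0, "") =
            PySem.List.pyGetD l (x - 1) (0, 0, "") := by
          have ea : PySem.List.pyGetD (l ++ [w]) (x - 1) (0, 0, "") =
              (l ++ [w])[(x - 1).toNat]'(by simp; omega) :=
            PySem.List.pyGetD_eq_getElem (l ++ [w]) (0, 0, "") (by omega)
              (by simp; omega)
          have eb : PySem.List.pyGetD l (x - 1) (0, 0, "") = l[(x - 1).toNat]'(by omega) :=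
            PySem.List.pyGetD_eq_getElem l (0, 0, "") (by omega) (by omega)
          rw [ea, eb, List.getElem_append_left (by omega)]
        rw [h1, h2]
      rw [hcongr]
      simp only [List.foldl_cons, List.foldl_nil]
      -- last step: index = l.length picks w and the last of l
      have hlw : PySem.List.pyGetD (l ++ [w]) ((l.length : Int)) (0, 0, "") = w := by
        have ea : PySem.List.pyGetD (l ++ [w]) ((l.length : Int)) (0, 0, "") =
            (l ++ [w])[((l.length : Int)).toNat]'(by simp) :=
          PySem.List.pyGetD_eq_getElem (l ++ [w]) (0, 0, "") (by omega)
            (by simp)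
        rw [ea]
        simp
      have hll : PySem.List.pyGetD (l ++ [w]) ((l.length : Int) - 1) (0, 0, "") =
          l.getLast (by rw [hl]; simp) := by
        have ea : PySem.List.pyGetD (l ++ [w]) ((l.length : Int) - 1) (0, 0, "") =
            (l ++ [w])[((l.length : Int) - 1).toNat]'(by simp; try omega) :=
          PySem.List.pyGetD_eq_getElem (l ++ [w]) (0, 0, "") (by omega)
            (by simp; try omega)
        rw [ea]
        have hidx : ((l.length : Int) - 1).toNat = l.length - 1 := by omega
        rw [List.getElem_append_left (by omega)]
        simp only [hidx]
        exact (List.getLast_eq_getElem _).symm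
      rw [hlw, hll]
      have hproj : pvProj (l ++ [w]) = pvProj l ++ [(w.1, w.2.1)] := by
        simp [pvProj]
      have hprojne : pvProj l ≠ [] := by rw [hl]; simp [pvProj]
      rw [hproj, pvGaps_snoc (pvProj l) hprojne]
      have hlast : (pvProj l).getLast hprojne = ((l.getLast (by rw [hl]; simp)).1,
          (l.getLast (by rw [hl]; simp)).2.1) := by
        simp [pvProj, List.getLast_map]
      rw [hlast]
      by_cases hcond : w.1 - (l.getLast (by rw [hl]; simp)).2.1 ≥ 2 <;>
        simp [hcond]

-- ===== VERDICT (by name: the statement is the Claim_ definition above) =====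
theorem detect_table_columns_py_spec : Claim_equal_detect_table_columns_py := by
  intro header_line _
  unfold Spec_detect_table_columns_py
  show detect_table_columns_py header_line = detect_table_columns_py_alt header_line
  have hS := pvAwords_spans header_line.toList 0 "" 0
  rw [if_pos rfl] at hS
  have hA := pvA_fold (pvAwords header_line.toList 0 "" 0)
  rw [hS] at hA
  have hB := pvB_fold (pvSpans header_line.toList 0)
  have hwords : (if (pvAloop header_line.toList 0 "" 0 []).2.1 ≠ "" then
      (pvAloop header_line.toList 0 "" 0 []).1 ++
        [((pvAloop header_line.toList 0 "" 0 []).2.2, (header_line.toList.length : Int),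
          (pvAloop header_line.toList 0 "" 0 []).2.1)]
    else (pvAloop header_line.toList 0 "" 0 []).1) = pvAwords header_line.toList 0 "" 0 := by
    simp [pvAwords]
  simp only [detect_table_columns_py, detect_table_columns_py_alt]
  rw [hwords, hA, hB]
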